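-- pv_equiv track=rewrite | github.com/JFRP-89/ScenarioBuilder | src/adapters/ui_gradio/ui/components/search_helpers.py | filter_by_mode_preset
-- ===== SOURCE A (Python) =====
-- from typing import Any
--
-- def filter_by_mode_preset(
--     cards: list[dict[str, Any]],
--     mode_filter: str = "All",
--     preset_filter: str = "All",
-- ) -> list[dict[str, Any]]:
--     """Filter cards by game mode and/or table preset.
--
--     Comparison is case-insensitive.  The sentinel ``"All"`` skips
--     that filtering dimension.
--     """
--     filtered = cards
--     if mode_filter != "All":
--         mode_lower = mode_filter.lower()
--         filtered = [c for c in filtered if c.get("mode", "").lower() == mode_lower]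
--     if preset_filter != "All":
--         preset_lower = preset_filter.lower()
--         filtered = [
--             c for c in filtered if c.get("table_preset", "").lower() == preset_lower
--         ]
--     return filtered
-- ===== SOURCE B (Python) =====
-- def filter_by_mode_preset(cards, mode_filter="All", preset_filter="All"):
--     """Single-pass filter with precomputed optional criteria (same result as the
--     two chained comprehensions; case-insensitive; "All" disables a dimension)."""
--     mode_lower = mode_filter.lower() if mode_filter != "All" else None
--     preset_lower = preset_filter.lower() if preset_filter != "All" else None
--     result = []
--     for c in cards:
--         if (mode_lower is None or c.get("mode", "").lower() == mode_lower) and (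
--             preset_lower is None or c.get("table_preset", "").lower() == preset_lower
--         ):
--             result.append(c)
--     return result
-- ===== Notes on version B (the rewrite author's own statement) =====
-- stated objective: simpler
-- what changed: Replaces the two chained filtering list comprehensions (building an intermediate list) with one pass over cards using precomputed optional lowercase criteria and a combined predicate.
import Mathlib
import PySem

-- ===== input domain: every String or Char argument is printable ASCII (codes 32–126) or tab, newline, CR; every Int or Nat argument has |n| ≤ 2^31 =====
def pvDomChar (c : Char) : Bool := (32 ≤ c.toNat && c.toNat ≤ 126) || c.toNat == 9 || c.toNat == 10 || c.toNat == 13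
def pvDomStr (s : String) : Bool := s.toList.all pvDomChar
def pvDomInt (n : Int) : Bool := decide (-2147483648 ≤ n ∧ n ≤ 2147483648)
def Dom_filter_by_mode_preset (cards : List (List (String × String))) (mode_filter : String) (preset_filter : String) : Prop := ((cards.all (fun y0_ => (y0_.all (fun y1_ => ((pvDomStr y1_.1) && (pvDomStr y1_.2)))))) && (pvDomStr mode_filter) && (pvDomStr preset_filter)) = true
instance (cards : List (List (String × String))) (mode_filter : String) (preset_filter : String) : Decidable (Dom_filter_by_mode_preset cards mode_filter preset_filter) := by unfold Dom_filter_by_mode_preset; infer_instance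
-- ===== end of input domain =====

-- B replaces A's two chained filtering comprehensions with one pass over cards
-- using precomputed optional lowercase criteria (objective: simpler).


-- ===== PORT A =====
-- c.get(k, "") on a dict-as-association-list: first match, default ""
def pvAGet (c : List (String × String)) (k : String) : String :=
  match c.find? (fun p => p.1 == k) with
  | some p => p.2
  | none => ""

def filter_by_mode_preset (cards : List (List (String × String))) (mode_filter : String) (preset_filter : String) : List (List (String × String)) :=
  let filtered := cards
  let filtered :=
    if mode_filter ≠ "All" then
      let mode_lower := PySem.Str.lower mode_filter
      filtered.filter (fun c => PySem.Str.lower (pvAGet c "mode") == mode_lower)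
    else filtered
  let filtered :=
    if preset_filter ≠ "All" then
      let preset_lower := PySem.Str.lower preset_filter
      filtered.filter (fun c => PySem.Str.lower (pvAGet c "table_preset") == preset_lower)
    else filtered
  filtered

-- ===== PORT B =====
def pvBGet (c : List (String × String)) (k : String) : String :=
  match c.find? (fun p => p.1 == k) with
  | some p => p.2
  | none => ""

-- the combined predicate: each criterion is None (inactive) or a lowercase string
def pvBKeep (mode_lower preset_lower : Option String) (c : List (String × String)) : Bool :=
  (match mode_lower with
   | none => true
   | some m => PySem.Str.lower (pvBGet c "mode") == m) &&
  (match preset_lower with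
   | none => true
   | some p => PySem.Str.lower (pvBGet c "table_preset") == p)

def filter_by_mode_preset_alt (cards : List (List (String × String))) (mode_filter : String) (preset_filter : String) : List (List (String × String)) :=
  let mode_lower := if mode_filter ≠ "All" then some (PySem.Str.lower mode_filter) else none
  let preset_lower := if preset_filter ≠ "All" then some (PySem.Str.lower preset_filter) else none
  cards.foldl (fun result c => if pvBKeep mode_lower preset_lower c then result ++ [c] else result) []

-- ===== PRECONDITION & SPEC =====
def Spec_filter_by_mode_preset (cards : List (List (String × String))) (mode_filter : String) (preset_filter : String) (out : List (List (String × String))) : Prop := out = filter_by_mode_preset_alt cards mode_filter preset_filter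
instance (cards : List (List (String × String))) (mode_filter : String) (preset_filter : String) (out : List (List (String × String))) : Decidable (Spec_filter_by_mode_preset cards mode_filter preset_filter out) := by unfold Spec_filter_by_mode_preset; infer_instance

-- ===== CLAIM (what is proved, stated in full; the proofs are below) =====
def Claim_equal_filter_by_mode_preset : Prop := ∀ (cards : List (List (String × String))) (mode_filter : String) (preset_filter : String), Dom_filter_by_mode_preset cards mode_filter preset_filter → Spec_filter_by_mode_preset cards mode_filter preset_filter (filter_by_mode_preset cards mode_filter preset_filter)

-- ===== LEMMAS AND PROOFS =====
theorem filter_eq (cards : List (List (String × String))) (mode_filter : String) (preset_filter : String) :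
    filter_by_mode_preset cards mode_filter preset_filter = filter_by_mode_preset_alt cards mode_filter preset_filter := by
  unfold filter_by_mode_preset filter_by_mode_preset_alt
  rw [PySem.List.foldl_append_if_eq_filter]
  by_cases hm : mode_filter = "All" <;> by_cases hp : preset_filter = "All"
  · simp [hm, hp, show pvBKeep none none = fun _ => true from rfl]
  · simp [hm, hp, show pvBKeep none (some (PySem.Str.lower preset_filter)) =
      fun c => PySem.Str.lower (pvAGet c "table_preset") == PySem.Str.lower preset_filter from by funext c; simp [pvBKeep, show pvBGet = pvAGet from rfl]]
  · simp [hm, hp, show pvBKeep (some (PySem.Str.lower mode_filter)) none =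
      fun c => PySem.Str.lower (pvAGet c "mode") == PySem.Str.lower mode_filter from by funext c; simp [pvBKeep, show pvBGet = pvAGet from rfl]]
  · simp [hm, hp, List.filter_filter, Bool.and_comm,
      show pvBKeep (some (PySem.Str.lower mode_filter)) (some (PySem.Str.lower preset_filter)) =
        fun c => (PySem.Str.lower (pvAGet c "mode") == PySem.Str.lower mode_filter) &&
                 (PySem.Str.lower (pvAGet c "table_preset") == PySem.Str.lower preset_filter) from by funext c; simp [pvBKeep, show pvBGet = pvAGet from rfl]]

-- ===== VERDICT (by name: the statement is the Claim_ definition above) =====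
theorem filter_by_mode_preset_spec : Claim_equal_filter_by_mode_preset := by
  intro cards mf pf _
  exact filter_eq cards mf pf
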